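-- pv_equiv track=rewrite | github.com/tupkalenkodi/DONE | 2023/stepping.py | limited_stepping_alt
-- ===== SOURCE A (Python) =====
-- def limited_stepping_alt(n, k):
--     if n == 1:
--         return [(0,)]
--     s = limited_stepping_alt(n - 1, k)
--     l = []
--     for x in s:
--         last = x[-1]
--         if -k <= last - 1 <= k:
--             l.append(x + (last - 1,))
--         if -k <= last + 1 <= k:
--             l.append(x + (last + 1,))
--     return l
-- ===== SOURCE B (Python) =====
-- def limited_stepping_alt(n, k):
--     # Iterative depth-first search with an explicit stack: grow one walk at a
--     # time, exploring the -1 step before the +1 step (so +1 is pushed first).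
--     stack = [((0,), 0, n - 1)]
--     out = []
--     while stack:
--         walk, last, remaining = stack.pop()
--         if remaining <= 0:
--             out.append(walk)
--             continue
--         if -k <= last + 1 <= k:
--             stack.append((walk + (last + 1,), last + 1, remaining - 1))
--         if -k <= last - 1 <= k:
--             stack.append((walk + (last - 1,), last - 1, remaining - 1))
--     return out
-- ===== Notes on version B (the rewrite author's own statement) =====
-- stated objective: alternative
-- what changed: Replaces the bottom-up generation-by-generation rebuild (compute all valid walks of length n-1, then extend each) with an iterative explicit-stack depth-first search that grows one walk at a time (pushing the +1 step before the -1 step so -1 is explored first), producing the same lexicographic order without deep recursion.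
import Mathlib
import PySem

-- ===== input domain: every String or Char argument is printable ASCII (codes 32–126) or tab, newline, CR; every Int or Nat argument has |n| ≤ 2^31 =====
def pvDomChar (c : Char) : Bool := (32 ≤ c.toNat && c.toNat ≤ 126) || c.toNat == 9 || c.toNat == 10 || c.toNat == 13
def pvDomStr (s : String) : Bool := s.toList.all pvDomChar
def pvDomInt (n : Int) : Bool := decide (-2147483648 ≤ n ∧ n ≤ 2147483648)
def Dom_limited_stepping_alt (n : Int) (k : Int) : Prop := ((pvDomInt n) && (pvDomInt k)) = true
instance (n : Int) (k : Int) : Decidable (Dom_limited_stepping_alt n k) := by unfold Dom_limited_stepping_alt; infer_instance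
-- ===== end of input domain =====

-- B replaces A's bottom-up generation rebuild with an iterative explicit-stack
-- depth-first search over one growing walk (alternative decomposition, same output order).

-- ===== PORT A =====
-- the loop body of A: for each walk x in s, append x+(last-1,) then x+(last+1,) when in bounds
def aExtLoop (k : Int) (s : List (List Int)) : List (List Int) :=
  s.foldl (fun l x =>
    let last := (PySem.List.pyGet? x (-1)).getD 0   -- x[-1]; x is never empty on reachable inputs
    let l := if -k ≤ last - 1 ∧ last - 1 ≤ k then l ++ [x ++ [last - 1]] else l
    if -k ≤ last + 1 ∧ last + 1 ≤ k then l ++ [x ++ [last + 1]] else l) []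

-- A's recursion on n, with fuel m = n - 1 (Python diverges for n ≤ 0; Pre_ excludes it)
def aGo (k : Int) : Nat → List (List Int)
  | 0 => [[0]]
  | m + 1 => aExtLoop k (aGo k m)

def limited_stepping_alt (n : Int) (k : Int) : List (List Int) :=
  aGo k (n - 1).toNat

-- ===== PORT B =====
-- explicit-stack DFS; a frame is (walk, last, remaining); +1 pushed before -1
-- so the -1 branch is explored first.  Python's 'remaining <= 0' base case is
-- the fuel-0 case here (remaining is (n-1).toNat).
def bLoop (k : Int) : List (List Int × Int × Nat) → List (List Int) → List (List Int)
  | [], out => out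
  | (walk, _last, 0) :: rest, out => bLoop k rest (out ++ [walk])
  | (walk, last, m + 1) :: rest, out =>
    let s1 := if -k ≤ last + 1 ∧ last + 1 ≤ k then (walk ++ [last + 1], last + 1, m) :: rest else rest
    let s2 := if -k ≤ last - 1 ∧ last - 1 ≤ k then (walk ++ [last - 1], last - 1, m) :: s1 else s1
    bLoop k s2 out
termination_by stack => (stack.map (fun f => 3 ^ f.2.2)).sum
decreasing_by
  · simp only [List.map_cons, List.sum_cons]; omega
  · have h3 : 0 < 3 ^ m := pow_pos (by omega) m
    split_ifs <;> simp only [List.map_cons, List.sum_cons, pow_succ] <;> omega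

def limited_stepping_alt_alt (n : Int) (k : Int) : List (List Int) :=
  bLoop k [([0], 0, (n - 1).toNat)] []

-- ===== PRECONDITION & SPEC =====
-- Python A recurses on n-1 without a base case below 1, so for n ≤ 0 it raises RecursionError.
def Pre_limited_stepping_alt (n : Int) (_k : Int) : Prop := 1 ≤ n
instance (n : Int) (k : Int) : Decidable (Pre_limited_stepping_alt n k) := by
  unfold Pre_limited_stepping_alt; infer_instance
def pvWitness_limited_stepping_alt : Int × Int := (4, 2)

def Spec_limited_stepping_alt (n : Int) (k : Int) (out : List (List Int)) : Prop :=
  out = limited_stepping_alt_alt n k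
instance (n : Int) (k : Int) (out : List (List Int)) : Decidable (Spec_limited_stepping_alt n k out) := by
  unfold Spec_limited_stepping_alt; infer_instance

-- ===== CLAIM (what is proved, stated in full; the proofs are below) =====
def Claim_equal_limited_stepping_alt : Prop := ∀ (n : Int) (k : Int), Dom_limited_stepping_alt n k → Pre_limited_stepping_alt n k → Spec_limited_stepping_alt n k (limited_stepping_alt n k)

-- ===== LEMMAS AND PROOFS =====

-- recursive semantics of the DFS stack loop
def bDfs (k : Int) (walk : List Int) (last : Int) : Nat → List (List Int)
  | 0 => [walk]
  | m + 1 =>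
    (if -k ≤ last - 1 ∧ last - 1 ≤ k then bDfs k (walk ++ [last - 1]) (last - 1) m else []) ++
    (if -k ≤ last + 1 ∧ last + 1 ≤ k then bDfs k (walk ++ [last + 1]) (last + 1) m else [])

theorem bLoop_eq_flatMap (k : Int) (N : Nat) :
    ∀ (stack : List (List Int × Int × Nat)) (out : List (List Int)),
      (stack.map (fun f => 3 ^ f.2.2)).sum ≤ N →
      bLoop k stack out = out ++ stack.flatMap (fun f => bDfs k f.1 f.2.1 f.2.2) := by
  induction N using Nat.strong_induction_on with
  | _ N ihN =>
    intro stack out hle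
    match stack with
    | [] => simp [bLoop]
    | (walk, last, 0) :: rest =>
      have hm : (rest.map (fun f => 3 ^ f.2.2)).sum < N := by
        simp only [List.map_cons, List.sum_cons] at hle; omega
      rw [bLoop, ihN _ hm rest (out ++ [walk]) le_rfl]
      simp [bDfs]
    | (walk, last, m + 1) :: rest =>
      have h3 : 0 < 3 ^ m := pow_pos (by omega) m
      have hsum : 3 ^ (m + 1) + (rest.map (fun f => 3 ^ f.2.2)).sum ≤ N := by
        simpa using hle
      rw [bLoop]
      simp only [List.flatMap_cons, bDfs]
      split_ifs with h1 h2 h2 <;>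
        [ rw [ihN _ (by simp [pow_succ] at hsum ⊢; omega) _ _ le_rfl];
          rw [ihN _ (by simp [pow_succ] at hsum ⊢; omega) _ _ le_rfl];
          rw [ihN _ (by simp [pow_succ] at hsum ⊢; omega) _ _ le_rfl];
          rw [ihN _ (by simp [pow_succ] at hsum ⊢; omega) _ _ le_rfl]] <;>
        simp

-- single-walk extension, as a flatMap body
def ext1 (k : Int) (x : List Int) : List (List Int) :=
  let last := (PySem.List.pyGet? x (-1)).getD 0
  (if -k ≤ last - 1 ∧ last - 1 ≤ k then [x ++ [last - 1]] else []) ++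
  (if -k ≤ last + 1 ∧ last + 1 ≤ k then [x ++ [last + 1]] else [])

theorem aExtLoop_eq_flatMap (k : Int) (s : List (List Int)) :
    aExtLoop k s = s.flatMap (ext1 k) := by
  have h : ∀ (acc : List (List Int)),
      s.foldl (fun l x =>
        let last := (PySem.List.pyGet? x (-1)).getD 0
        let l := if -k ≤ last - 1 ∧ last - 1 ≤ k then l ++ [x ++ [last - 1]] else l
        if -k ≤ last + 1 ∧ last + 1 ≤ k then l ++ [x ++ [last + 1]] else l) acc
      = acc ++ s.flatMap (ext1 k) := by
    induction s with
    | nil => simp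
    | cons x xs ih =>
      intro acc
      simp only [List.foldl_cons, List.flatMap_cons, ih]
      simp only [ext1]
      split_ifs <;> simp
  have := h []
  rw [List.nil_append] at this
  exact this

-- iterate aExtLoop from an arbitrary seed list
def aIter (k : Int) : Nat → List (List Int) → List (List Int)
  | 0, l => l
  | m + 1, l => aExtLoop k (aIter k m l)

theorem aGo_eq_aIter (k : Int) (m : Nat) : aGo k m = aIter k m [[0]] := by
  induction m with
  | zero => rfl
  | succ m ih => simp [aGo, aIter, ih]

theorem aIter_shift (k : Int) (m : Nat) (l : List (List Int)) :
    aIter k (m + 1) l = aIter k m (aExtLoop k l) := by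
  induction m generalizing l with
  | zero => rfl
  | succ m ih =>
    rw [show aIter k (m + 1 + 1) l = aExtLoop k (aIter k (m + 1) l) from rfl, ih]
    rfl

theorem aIter_append (k : Int) (m : Nat) (l₁ l₂ : List (List Int)) :
    aIter k m (l₁ ++ l₂) = aIter k m l₁ ++ aIter k m l₂ := by
  induction m generalizing l₁ l₂ with
  | zero => rfl
  | succ m ih =>
    rw [aIter_shift, aIter_shift, aIter_shift, aExtLoop_eq_flatMap, List.flatMap_append,
      ih, ← aExtLoop_eq_flatMap, ← aExtLoop_eq_flatMap]

theorem aIter_nil (k : Int) (m : Nat) : aIter k m [] = [] := by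
  induction m with
  | zero => rfl
  | succ m ih => rw [aIter_shift, aExtLoop_eq_flatMap]; simp [ih]

theorem aIter_eq_bDfs (k : Int) (m : Nat) (walk : List Int) (last : Int)
    (h : walk.getLast? = some last) :
    aIter k m [walk] = bDfs k walk last m := by
  induction m generalizing walk last with
  | zero => rfl
  | succ m ih =>
    rw [aIter_shift, aExtLoop_eq_flatMap]
    have hget : PySem.List.pyGet? walk (-1) = some last := by
      rw [PySem.List.pyGet?_neg_one, h]
    simp only [List.flatMap_cons, List.flatMap_nil, List.append_nil, ext1, hget, Option.getD_some]
    rw [bDfs]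
    have e1 := ih (walk ++ [last - 1]) (last - 1) (by simp)
    have e2 := ih (walk ++ [last + 1]) (last + 1) (by simp)
    split_ifs with h1 h2 h2 <;>
      simp only [aIter_append, aIter_nil, e1, e2, List.append_nil, List.nil_append]

-- ===== VERDICT (by name: the statement is the Claim_ definition above) =====
theorem limited_stepping_alt_spec : Claim_equal_limited_stepping_alt := by
  intro n k _ _
  unfold Spec_limited_stepping_alt limited_stepping_alt limited_stepping_alt_alt
  rw [aGo_eq_aIter, aIter_eq_bDfs k _ [0] 0 rfl,
    bLoop_eq_flatMap k _ _ _ le_rfl]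
  simp
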